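-- pv_equiv track=rewrite | github.com/scsystem1/ChemBO-Agent | core/campaign_runner.py | _slugify_run_component
-- ===== SOURCE A (Python) =====
-- from typing import Any, Callable
--
-- def _slugify_run_component(value: Any) -> str:
--     text = str(value or "").strip()
--     if not text:
--         return "unknown"
--     normalized = []
--     previous_dash = False
--     for char in text:
--         if char.isalnum() or char in {".", "_", "-"}:
--             normalized.append(char)
--             previous_dash = False
--             continue
--         if not previous_dash:
--             normalized.append("-")
--             previous_dash = True
--     slug = "".join(normalized).strip("-._")
--     return slug or "unknown"
-- ===== SOURCE B (Python) =====
-- def _slugify_run_component(value):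
--     text = str(value or "").strip()
--     if not text:
--         return "unknown"
--
--     def allowed(c):
--         return c.isalnum() or c in "._-"
--
--     # split text into its maximal runs of allowed characters: one token per run
--     # (an empty token before a leading disallowed run), skipping each
--     # following run of disallowed characters
--     tokens = []
--     i, n = 0, len(text)
--     while i < n:
--         j = i
--         while j < n and allowed(text[j]):
--             j += 1
--         tokens.append(text[i:j])
--         i = j
--         while i < n and not allowed(text[i]):
--             i += 1
--
--     slug = "-".join(tokens).strip("-._")
--     return slug or "unknown"
-- ===== Notes on version B (the rewrite author's own statement) =====
-- stated objective: alternative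
-- what changed: Replaces A's single character-by-character pass with a previous_dash flag by a split-then-join decomposition: the text is first split into its maximal runs of allowed characters (skipping each following disallowed run), then the tokens are joined with a dash separator, so separators come from the join and a trailing disallowed run yields no dash at all before the final strip.
import Mathlib
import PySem

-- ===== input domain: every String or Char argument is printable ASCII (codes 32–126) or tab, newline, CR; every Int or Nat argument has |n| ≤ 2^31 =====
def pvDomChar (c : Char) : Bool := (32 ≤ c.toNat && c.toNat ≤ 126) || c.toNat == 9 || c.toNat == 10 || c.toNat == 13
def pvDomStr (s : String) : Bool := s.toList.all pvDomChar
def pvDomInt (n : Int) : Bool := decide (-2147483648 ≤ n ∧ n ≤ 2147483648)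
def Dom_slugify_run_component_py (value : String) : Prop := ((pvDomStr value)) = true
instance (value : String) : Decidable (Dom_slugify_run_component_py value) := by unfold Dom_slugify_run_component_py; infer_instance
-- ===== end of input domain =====

-- B replaces A's per-character previous_dash flag loop by a split-into-maximal-allowed-runs
-- recursion joined with "-" (dashes come from join, not from the scan); same return value.

-- ===== PORT A =====
def slugify_run_component_py (value : String) : String :=
  let text := PySem.Str.strip value
  if text = "" then "unknown" else
  let st := text.toList.foldl
      (fun (st : List Char × Bool) c =>
        if PySem.Chars.isalnum c || ['.', '_', '-'].contains c then (st.1 ++ [c], false)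
        else if st.2 = false then (st.1 ++ ['-'], true) else st)
      ([], false)
  let slug := PySem.Chars.stripChars st.1 ['-', '.', '_']
  if slug = [] then "unknown" else String.ofList slug

-- ===== PORT B =====
def pvAllowed (c : Char) : Bool := PySem.Chars.isalnum c || ['.', '_', '-'].contains c

-- termination of the token recursion: the remainder after one run pair is strictly shorter
lemma pvTokens_dec (c : Char) (t : List Char) :
    (List.dropWhile (fun d => !pvAllowed d) (List.dropWhile pvAllowed (c :: t))).length
      < (c :: t).length := by
  by_cases h : pvAllowed c = true
  · rw [List.dropWhile_cons, if_pos h]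
    have h1 := List.length_dropWhile_le (fun d => !pvAllowed d) (List.dropWhile pvAllowed t)
    have h2 := List.length_dropWhile_le pvAllowed t
    simp only [List.length_cons]; omega
  · have hF : pvAllowed c = false := by simpa using h
    rw [List.dropWhile_cons, if_neg (by simp [hF]), List.dropWhile_cons,
      if_pos (by simp [hF])]
    have h1 := List.length_dropWhile_le (fun d => !pvAllowed d) t
    simp only [List.length_cons]; omega

-- port of B's tokens(s): one token per maximal allowed run, then skip the following bad run
def pvTokens : List Char → List (List Char)
  | [] => []
  | c :: t =>
      List.takeWhile pvAllowed (c :: t) ::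
        pvTokens (List.dropWhile (fun d => !pvAllowed d) (List.dropWhile pvAllowed (c :: t)))
termination_by cs => cs.length
decreasing_by exact pvTokens_dec c t

def slugify_run_component_py_alt (value : String) : String :=
  let text := PySem.Str.strip value
  if text = "" then "unknown" else
  let slug := PySem.Chars.stripChars (List.intercalate ['-'] (pvTokens text.toList)) ['-', '.', '_']
  if slug = [] then "unknown" else String.ofList slug

-- ===== PRECONDITION & SPEC =====
def Spec_slugify_run_component_py (value : String) (out : String) : Prop := out = slugify_run_component_py_alt value
instance (value : String) (out : String) : Decidable (Spec_slugify_run_component_py value out) := by unfold Spec_slugify_run_component_py; infer_instance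

-- ===== CLAIM (what is proved, stated in full; the proofs are below) =====
def Claim_equal_slugify_run_component_py : Prop := ∀ (value : String), Dom_slugify_run_component_py value → Spec_slugify_run_component_py value (slugify_run_component_py value)

-- ===== LEMMAS AND PROOFS =====

-- proof-side run decomposition (maximal runs with their key), used to characterise A's fold
def pvRuns : List Char → List (Bool × List Char)
  | [] => []
  | c :: cs =>
    (pvAllowed c, c :: cs.takeWhile (fun d => pvAllowed d == pvAllowed c)) ::
      pvRuns (cs.dropWhile (fun d => pvAllowed d == pvAllowed c))
termination_by cs => cs.length
decreasing_by exact Nat.lt_succ_of_le (List.length_dropWhile_le _ _)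

-- A's emitted piece list, run by run
def pvB (cs : List Char) : List Char :=
  (pvRuns cs).flatMap (fun g => if g.1 then g.2 else ['-'])

-- does cs start with a disallowed character?
def pvBad : List Char → Bool
  | [] => false
  | c :: _ => !pvAllowed c

lemma pvB_cons_allowed (c : Char) (cs : List Char) (h : pvAllowed c = true) :
    pvB (c :: cs) = c :: pvB cs := by
  cases cs with
  | nil => simp [pvB, pvRuns, h]
  | cons c' t =>
    by_cases h' : pvAllowed c' = true
    · rw [pvB, pvRuns]
      simp [pvB, pvRuns, h, h', List.takeWhile, List.dropWhile]
    · rw [pvB, pvRuns]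
      simp [pvB, pvRuns, h, h', List.takeWhile, List.dropWhile]

lemma pvB_cons_bad_good (c : Char) (cs : List Char) (h : pvAllowed c = false)
    (h2 : pvBad cs = false) : pvB (c :: cs) = '-' :: pvB cs := by
  cases cs with
  | nil => simp [pvB, pvRuns, h]
  | cons c' t =>
    have h' : pvAllowed c' = true := by
      simpa [pvBad] using h2
    rw [pvB, pvRuns]
    simp only [List.takeWhile, List.dropWhile, h, h', List.flatMap_cons,
      Bool.false_eq_true, reduceIte, List.singleton_append]
    rfl

lemma pvB_cons_bad_bad (c : Char) (cs : List Char) (h : pvAllowed c = false)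
    (h2 : pvBad cs = true) : pvB (c :: cs) = pvB cs := by
  cases cs with
  | nil => simp [pvBad] at h2
  | cons c' t =>
    have h' : pvAllowed c' = false := by
      simpa [pvBad] using h2
    rw [pvB, pvRuns]
    conv_rhs => rw [pvB, pvRuns]
    simp [h, h', List.takeWhile, List.dropWhile]

-- A's loop body
def pvStep (st : List Char × Bool) (c : Char) : List Char × Bool :=
  if PySem.Chars.isalnum c || ['.', '_', '-'].contains c then (st.1 ++ [c], false)
  else if st.2 = false then (st.1 ++ ['-'], true) else st

-- main invariant: A's foldl emits exactly the run output pvB (dropping the leading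
-- dash when the flag is already set and cs starts disallowed)
lemma pv_main (cs : List Char) :
    (∀ acc : List Char, (cs.foldl pvStep (acc, false)).1 = acc ++ pvB cs) ∧
    (∀ acc : List Char,
      (cs.foldl pvStep (acc, true)).1
        = acc ++ (if pvBad cs then (pvB cs).tail else pvB cs)) ∧
    (pvBad cs = true → pvB cs = '-' :: (pvB cs).tail) := by
  induction cs with
  | nil => simp [pvB, pvRuns, pvBad]
  | cons c t ih =>
    obtain ⟨ih1, ih2, ih3⟩ := ih
    by_cases h : pvAllowed c = true
    · have hc : (PySem.Chars.isalnum c || ['.', '_', '-'].contains c) = pvAllowed c := rfl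
      have hstep : ∀ st : List Char × Bool, pvStep st c = (st.1 ++ [c], false) := by
        intro st; simp only [pvStep]; rw [hc, h]; simp
      refine ⟨?_, ?_, ?_⟩
      · intro acc
        simp only [List.foldl_cons, hstep]
        rw [ih1, pvB_cons_allowed c t h]; simp
      · intro acc
        simp only [List.foldl_cons, hstep]
        have : pvBad (c :: t) = false := by simp [pvBad, h]
        rw [ih1, pvB_cons_allowed c t h, this]; simp
      · intro hb; simp [pvBad, h] at hb
    · have hF : pvAllowed c = false := by simpa using h
      have hc : (PySem.Chars.isalnum c || ['.', '_', '-'].contains c) = pvAllowed c := rfl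
      have hstepF : ∀ l : List Char, pvStep (l, false) c = (l ++ ['-'], true) := by
        intro l; simp only [pvStep]; rw [hc, hF]; simp
      have hstepT : ∀ l : List Char, pvStep (l, true) c = (l, true) := by
        intro l; simp only [pvStep]; rw [hc, hF]; simp
      have hbad : pvBad (c :: t) = true := by simp [pvBad, hF]
      by_cases h2 : pvBad t = true
      · have hB := pvB_cons_bad_bad c t hF h2
        refine ⟨?_, ?_, ?_⟩
        · intro acc
          simp only [List.foldl_cons, hstepF]
          rw [ih2, if_pos h2, hB, ih3 h2]; simp
        · intro acc
          simp only [List.foldl_cons, hstepT]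
          rw [ih2, if_pos h2, hbad, hB]; simp
        · intro _; rw [hB]; exact ih3 h2
      · have h2f : pvBad t = false := by simpa using h2
        have hB := pvB_cons_bad_good c t hF h2f
        refine ⟨?_, ?_, ?_⟩
        · intro acc
          simp only [List.foldl_cons, hstepF]
          rw [ih2, if_neg h2, hB]; simp
        · intro acc
          simp only [List.foldl_cons, hstepT]
          rw [ih2, if_neg h2, hbad, hB]; simp
        · intro _; rw [hB]; simp

-- trailing dash A emits (and B's join omits) when the text ends in a disallowed char
def pvTrail (cs : List Char) : List Char :=
  match cs.getLast? with
  | none => []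
  | some c => if pvAllowed c then [] else ['-']

lemma pvTrail_cons (c : Char) (t : List Char) (h : t ≠ []) :
    pvTrail (c :: t) = pvTrail t := by
  unfold pvTrail
  cases t with
  | nil => exact absurd rfl h
  | cons d t' => rw [List.getLast?_cons_cons]

lemma inter_cons_head (c : Char) (tok : List Char) (rest : List (List Char)) :
    List.intercalate ['-'] ((c :: tok) :: rest) = c :: List.intercalate ['-'] (tok :: rest) := by
  cases rest with
  | nil => simp [List.intercalate, List.intersperse]
  | cons y ys => simp [List.intercalate, List.intersperse]

lemma inter_nil_cons (x : List Char) (xs : List (List Char)) :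
    List.intercalate ['-'] ([] :: x :: xs) = '-' :: List.intercalate ['-'] (x :: xs) := by
  simp [List.intercalate, List.intersperse]

lemma pvTokens_ne_nil (c : Char) (t : List Char) : pvTokens (c :: t) ≠ [] := by
  rw [pvTokens]; simp

-- bridge: A's run output is B's joined tokens plus the trailing dash
lemma pvB_eq_inter (cs : List Char) :
    pvB cs = List.intercalate ['-'] (pvTokens cs) ++ pvTrail cs := by
  induction cs with
  | nil => simp [pvB, pvRuns, pvTokens, pvTrail, List.intercalate]
  | cons c t ihT' =>
  cases t with
  | nil =>
    by_cases h : pvAllowed c = true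
    · simp [pvB, pvRuns, pvTokens, pvTrail, h, List.takeWhile, List.dropWhile,
        List.intercalate]
    · have hF : pvAllowed c = false := by simpa using h
      simp [pvB, pvRuns, pvTokens, pvTrail, hF, List.takeWhile, List.dropWhile,
        List.intercalate]
  | cons d t =>
    have ihT := ihT'
    have htr := pvTrail_cons c (d :: t) (by simp)
    by_cases h : pvAllowed c = true
    · -- head allowed
      have hBc := pvB_cons_allowed c (d :: t) h
      by_cases hd : pvAllowed d = true
      · -- next also allowed: token of (c::d::t) is c :: token of (d::t)
        have e1 : pvTokens (c :: d :: t)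
            = (c :: List.takeWhile pvAllowed (d :: t)) ::
              pvTokens (List.dropWhile (fun x => !pvAllowed x) (List.dropWhile pvAllowed (d :: t))) := by
          rw [pvTokens]
          simp [List.takeWhile, h]
        have e2 : pvTokens (d :: t)
            = List.takeWhile pvAllowed (d :: t) ::
              pvTokens (List.dropWhile (fun x => !pvAllowed x) (List.dropWhile pvAllowed (d :: t))) := by
          rw [pvTokens]
        rw [hBc, ihT, e1, e2, inter_cons_head, htr]
        simp
      · -- next bad: token of (c::d::t) is [c], tokens of (d::t) start with []
        have hdF : pvAllowed d = false := by simpa using hd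
        have e1 : pvTokens (c :: d :: t)
            = [c] :: pvTokens (List.dropWhile (fun x => !pvAllowed x) (d :: t)) := by
          rw [pvTokens]
          simp [List.takeWhile, List.dropWhile, h, hdF]
        have e2 : pvTokens (d :: t)
            = [] :: pvTokens (List.dropWhile (fun x => !pvAllowed x) (d :: t)) := by
          rw [pvTokens]
          simp [List.takeWhile, List.dropWhile, hdF]
        rw [hBc, ihT, e1, e2, inter_cons_head, htr]
        simp
    · have hF : pvAllowed c = false := by simpa using h
      by_cases hd : pvAllowed d = true
      · -- bad then allowed: A emits a dash, B's tokens get a leading empty token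
        have hBc := pvB_cons_bad_good c (d :: t) hF (by simp [pvBad, hd])
        have e1 : pvTokens (c :: d :: t)
            = [] :: pvTokens (d :: t) := by
          rw [pvTokens]
          simp [List.takeWhile, List.dropWhile, hF, hd]
        obtain ⟨x, xs, hx⟩ : ∃ x xs, pvTokens (d :: t) = x :: xs := by
          cases hT : pvTokens (d :: t) with
          | nil => exact absurd hT (pvTokens_ne_nil d t)
          | cons x xs => exact ⟨x, xs, rfl⟩
        rw [hBc, ihT, e1, hx, inter_nil_cons, htr]
        simp
      · -- bad then bad: both sides drop the second bad char's effect
        have hdF : pvAllowed d = false := by simpa using hd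
        have hBc := pvB_cons_bad_bad c (d :: t) hF (by simp [pvBad, hdF])
        have e1 : pvTokens (c :: d :: t) = pvTokens (d :: t) := by
          conv_rhs => rw [pvTokens]
          rw [pvTokens]
          simp [List.takeWhile, List.dropWhile, hF, hdF]
        rw [hBc, ihT, e1, htr]

-- stripping absorbs the trailing dash
lemma strip_append_dash (x : List Char) :
    PySem.Chars.stripChars (x ++ ['-']) ['-', '.', '_']
      = PySem.Chars.stripChars x ['-', '.', '_'] := by
  show (List.dropWhile (fun c => ['-', '.', '_'].contains c)
      (List.dropWhile (fun c => ['-', '.', '_'].contains c) (x ++ ['-'])).reverse).reverse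
    = (List.dropWhile (fun c => ['-', '.', '_'].contains c)
      (List.dropWhile (fun c => ['-', '.', '_'].contains c) x).reverse).reverse
  cases hx : List.dropWhile (fun c => ['-', '.', '_'].contains c) x with
  | nil =>
    rw [List.dropWhile_append, hx]
    simp
  | cons y ys =>
    rw [List.dropWhile_append, hx]
    simp only [List.isEmpty_cons, Bool.false_eq_true, reduceIte]
    rw [List.reverse_append]
    simp

-- ===== VERDICT (by name: the statement is the Claim_ definition above) =====
theorem slugify_run_component_py_spec : Claim_equal_slugify_run_component_py := by
  unfold Claim_equal_slugify_run_component_py Spec_slugify_run_component_py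
  intro value _
  unfold slugify_run_component_py slugify_run_component_py_alt
  simp only []
  by_cases h : PySem.Str.strip value = ""
  · simp [h]
  · simp only [h, reduceIte]
    have hfold := (pv_main (PySem.Str.strip value).toList).1 []
    rw [show (fun (st : List Char × Bool) c =>
        if PySem.Chars.isalnum c || ['.', '_', '-'].contains c then (st.1 ++ [c], false)
        else if st.2 = false then (st.1 ++ ['-'], true) else st) = pvStep from rfl]
    rw [hfold]
    simp only [List.nil_append]
    rw [pvB_eq_inter]
    unfold pvTrail
    cases hL : (PySem.Str.strip value).toList.getLast? with
    | none => simp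
    | some c =>
      by_cases hc : pvAllowed c = true
      · simp [hc]
      · have hF : pvAllowed c = false := by simpa using hc
        simp only [hF, Bool.false_eq_true, reduceIte]
        rw [strip_append_dash]
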